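-- pv_equiv track=rewrite | github.com/theyeeman/advent-of-code-2021 | day7/day7-p2.py | init_min_fuel
-- ===== SOURCE A (Python) =====
-- def init_min_fuel(d):  # Find required fuel to move crabs to position 0
--     total_fuel = 0
--
--     for key, val in d.items():
--         temp = 0
--
--         for i in range(1, key):
--             temp += i
--
--         total_fuel += temp * val
--
--     return total_fuel
-- ===== SOURCE B (Python) =====
-- def init_min_fuel(d):  # Find required fuel to move crabs to position 0
--     # closed-form triangular number instead of the inner summation loop
--     return sum(val * (key * (key - 1) // 2) for key, val in d.items() if key > 1)
-- ===== Notes on version B (the rewrite author's own statement) =====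
-- stated objective: faster
-- what changed: Replaces the inner range(1,key) summation loop with the closed-form triangular number key*(key-1)//2 inside a single generator-expression sum.
import Mathlib
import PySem

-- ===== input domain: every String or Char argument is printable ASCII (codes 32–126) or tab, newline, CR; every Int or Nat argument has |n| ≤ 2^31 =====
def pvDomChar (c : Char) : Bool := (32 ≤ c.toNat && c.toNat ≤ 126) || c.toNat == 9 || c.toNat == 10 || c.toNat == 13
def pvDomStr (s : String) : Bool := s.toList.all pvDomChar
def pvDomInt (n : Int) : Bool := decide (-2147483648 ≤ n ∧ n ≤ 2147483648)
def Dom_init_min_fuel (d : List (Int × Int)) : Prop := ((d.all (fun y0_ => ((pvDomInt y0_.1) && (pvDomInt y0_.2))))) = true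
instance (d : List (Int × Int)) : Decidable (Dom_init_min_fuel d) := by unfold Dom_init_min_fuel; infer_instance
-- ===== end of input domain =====

-- ===== PORT A =====
-- literal port of A: for each (key,val), temp = sum over range(1,key), accumulated as temp*val
def init_min_fuel (d : List (Int × Int)) : Int :=
  d.foldl (fun total_fuel kv =>
    let temp : Int := (PySem.List.pyRange 1 kv.1 1).foldl (fun t i => t + i) 0
    total_fuel + temp * kv.2) 0

-- ===== PORT B =====
-- B: closed-form triangular number key*(key-1)//2, one pass (sum of a filtered generator)
def init_min_fuel_alt (d : List (Int × Int)) : Int :=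
  ((d.filter (fun kv => decide (1 < kv.1))).map
    (fun kv => kv.2 * PySem.Int.floordiv (kv.1 * (kv.1 - 1)) 2)).sum

-- ===== PRECONDITION & SPEC =====
def Spec_init_min_fuel (d : List (Int × Int)) (out : Int) : Prop := out = init_min_fuel_alt d
instance (d : List (Int × Int)) (out : Int) : Decidable (Spec_init_min_fuel d out) := by unfold Spec_init_min_fuel; infer_instance

-- ===== CLAIM (what is proved, stated in full; the proofs are below) =====
def Claim_equal_init_min_fuel : Prop := ∀ (d : List (Int × Int)), Dom_init_min_fuel d → Spec_init_min_fuel d (init_min_fuel d)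

-- ===== LEMMAS AND PROOFS =====

-- sum of the shifted range [1, 2, …, n] as a fold, in closed form
theorem pv_sum_shift (n : Nat) :
    ((List.range n).map (fun j : Nat => (1:Int) + (j:Int))).foldl (fun t i => t + i) 0
      = ((n:Int) * ((n:Int) + 1)) / 2 := by
  induction n with
  | zero => simp
  | succ m ih =>
    rw [List.range_succ, List.map_append, List.foldl_append, ih]
    simp only [List.map_cons, List.map_nil, List.foldl_cons, List.foldl_nil]
    push_cast
    have he : ((m:Int) + 1) * ((m:Int) + 1 + 1) = (m:Int) * ((m:Int) + 1) + 2 * ((m:Int) + 1) := by ring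
    rw [he]
    omega

-- the inner loop of A computes the triangular number of kv.1
theorem pv_temp_eq (k : Int) :
    (PySem.List.pyRange 1 k 1).foldl (fun t i => t + i) 0
      = if 1 < k then PySem.Int.floordiv (k * (k - 1)) 2 else 0 := by
  rw [PySem.List.pyRange_one, pv_sum_shift]
  by_cases h : 1 < k
  · simp only [h, if_pos]
    have hk : ((k - 1).toNat : Int) = k - 1 := by omega
    rw [PySem.Int.floordiv]
    have h2 : Int.fdiv (k * (k - 1)) 2 = (k * (k - 1)) / 2 := by
      rw [Int.fdiv_eq_ediv_of_nonneg]
      nlinarith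
    rw [h2]
    congr 1
    push_cast [hk]
    ring
  · simp only [h, if_neg, if_false]
    have : (k - 1).toNat = 0 := by omega
    simp [this]

-- fold of A over the list equals acc + B's filtered sum
theorem pv_main (d : List (Int × Int)) (acc : Int) :
    d.foldl (fun total_fuel kv =>
      let temp : Int := (PySem.List.pyRange 1 kv.1 1).foldl (fun t i => t + i) 0
      total_fuel + temp * kv.2) acc
      = acc + ((d.filter (fun kv => decide (1 < kv.1))).map
          (fun kv => kv.2 * PySem.Int.floordiv (kv.1 * (kv.1 - 1)) 2)).sum := by
  induction d generalizing acc with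
  | nil => simp
  | cons kv tl ih =>
    simp only [List.foldl_cons, List.filter_cons]
    rw [ih]
    by_cases h : 1 < kv.1
    · simp only [h, decide_true, if_pos, List.map_cons, List.sum_cons, pv_temp_eq]
      ring
    · simp only [h, decide_false, Bool.false_eq_true, if_false, pv_temp_eq]
      ring_nf

-- ===== VERDICT (by name: the statement is the Claim_ definition above) =====
theorem init_min_fuel_spec : Claim_equal_init_min_fuel := by
  intro d _
  unfold Spec_init_min_fuel init_min_fuel init_min_fuel_alt
  rw [pv_main]
  ring
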